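-- pv_equiv track=rewrite | github.com/tom2tomtomtom/congressional-trading-system | src/analysis/options_analyzer.py | _group_trades_by_member
-- ===== SOURCE A (Python) =====
-- from typing import Dict, List, Optional, Tuple, Any, Union
--
-- def _group_trades_by_member(trades_data: List[Dict]) -> Dict[str, List[Dict]]:
--     """Group trades by member ID."""
--     grouped = {}
--
--     for trade in trades_data:
--         member_id = trade.get('bioguide_id', 'UNKNOWN')
--
--         if member_id not in grouped:
--             grouped[member_id] = []
--         grouped[member_id].append(trade)
--
--     return grouped
-- ===== SOURCE B (Python) =====
-- def _group_trades_by_member(trades_data):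
--     """Group trades by member ID: collect the distinct keys first, then one
--     filtering pass per key (two-phase nested-scan decomposition)."""
--     def key(trade):
--         return trade.get('bioguide_id', 'UNKNOWN')
--     keys = dict.fromkeys(key(t) for t in trades_data)
--     return {k: [t for t in trades_data if key(t) == k] for k in keys}
-- ===== Notes on version B (the rewrite author's own statement) =====
-- stated objective: alternative
-- what changed: Replaced the single-pass hash-streaming append loop with a two-phase decomposition: first collect the distinct member ids in order of first occurrence (dict.fromkeys), then build each group by an independent filtering pass over the input.
import Mathlib
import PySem

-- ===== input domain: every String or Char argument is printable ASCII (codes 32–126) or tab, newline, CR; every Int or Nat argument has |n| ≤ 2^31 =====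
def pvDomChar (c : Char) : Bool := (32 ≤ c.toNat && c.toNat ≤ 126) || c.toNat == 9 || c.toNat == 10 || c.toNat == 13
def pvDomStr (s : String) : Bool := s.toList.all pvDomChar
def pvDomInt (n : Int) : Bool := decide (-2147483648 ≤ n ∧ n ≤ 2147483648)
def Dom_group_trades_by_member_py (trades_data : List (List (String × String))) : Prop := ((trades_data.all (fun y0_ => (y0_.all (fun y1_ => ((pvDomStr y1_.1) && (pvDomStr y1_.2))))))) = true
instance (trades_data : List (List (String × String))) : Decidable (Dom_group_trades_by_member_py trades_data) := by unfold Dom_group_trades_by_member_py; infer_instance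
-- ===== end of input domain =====

-- B replaces A's single-pass streaming-append loop with a two-phase decomposition
-- (distinct keys first, then one filter pass per key); objective: alternative (same result, not faster).

-- ===== PORT A =====
-- trade.get('bioguide_id', 'UNKNOWN')
def pvTradeKey (t : List (String × String)) : String :=
  (PySem.Dict.mk t).getD "bioguide_id" "UNKNOWN"

-- the body of A's for-loop: ensure the key is present, then append the trade
def pvStepA (g : PySem.Dict String (List (List (String × String))))
    (t : List (String × String)) : PySem.Dict String (List (List (String × String))) :=
  let member_id := pvTradeKey t
  let g1 := if g.contains member_id then g else g.insert member_id []
  g1.modify member_id [] (· ++ [t])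

def group_trades_by_member_py (trades_data : List (List (String × String))) :
    List (String × List (List (String × String))) :=
  (trades_data.foldl pvStepA PySem.Dict.empty).items

-- ===== PORT B =====
def group_trades_by_member_py_alt (trades_data : List (List (String × String))) :
    List (String × List (List (String × String))) :=
  let keys := PySem.List.dedup (trades_data.map pvTradeKey)
  keys.map (fun k => (k, trades_data.filter (fun t => pvTradeKey t == k)))

-- ===== PRECONDITION & SPEC =====
def Spec_group_trades_by_member_py (trades_data : List (List (String × String))) (out : List (String × List (List (String × String)))) : Prop := out = group_trades_by_member_py_alt trades_data
instance (trades_data : List (List (String × String))) (out : List (String × List (List (String × String)))) : Decidable (Spec_group_trades_by_member_py trades_data out) := by unfold Spec_group_trades_by_member_py; infer_instance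

-- ===== CLAIM (what is proved, stated in full; the proofs are below) =====
def Claim_equal_group_trades_by_member_py : Prop := ∀ (trades_data : List (List (String × String))), Dom_group_trades_by_member_py trades_data → Spec_group_trades_by_member_py trades_data (group_trades_by_member_py trades_data)

-- ===== LEMMAS AND PROOFS =====

-- A's loop body is a single modify-append (the 'insert [] if absent' is absorbed)
theorem pvStepA_eq_modify (g : PySem.Dict String (List (List (String × String))))
    (t : List (String × String)) :
    pvStepA g t = g.modify (pvTradeKey t) [] (· ++ [t]) := by
  unfold pvStepA
  by_cases h : g.contains (pvTradeKey t)
  · simp [h]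
  · simp only [Bool.not_eq_true] at h
    simp [h, PySem.Dict.modify, PySem.Dict.getD_insert_self,
      PySem.Dict.insert_insert_self, PySem.Dict.getD_of_not_contains g ([] : List (List (String × String))) h]

theorem pvFoldA_eq_pair_fold (trades_data : List (List (String × String))) :
    trades_data.foldl pvStepA PySem.Dict.empty
      = (trades_data.map (fun t => (pvTradeKey t, t))).foldl
          (fun d p => d.modify p.1 [] (· ++ [p.2])) PySem.Dict.empty := by
  rw [List.foldl_map]
  exact PySem.List.foldl_congr_mem trades_data _ _ _ (fun g t _ => pvStepA_eq_modify g t)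

-- ===== VERDICT (by name: the statement is the Claim_ definition above) =====
theorem group_trades_by_member_py_spec : Claim_equal_group_trades_by_member_py := by
  intro trades_data _
  unfold Spec_group_trades_by_member_py group_trades_by_member_py group_trades_by_member_py_alt
  rw [pvFoldA_eq_pair_fold]
  have hnd : ((trades_data.map (fun t => (pvTradeKey t, t))).foldl
      (fun d p => d.modify p.1 [] (· ++ [p.2])) PySem.Dict.empty).keys.Nodup :=
    PySem.Dict.nodup_keys_foldl_modify_key _ Prod.fst [] (fun _ p => (· ++ [p.2]))
      PySem.Dict.empty (by simp)
  have hkeys : ((trades_data.map (fun t => (pvTradeKey t, t))).foldl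
      (fun d p => d.modify p.1 [] (· ++ [p.2])) PySem.Dict.empty).keys
      = PySem.Set.ofList (trades_data.map pvTradeKey) := by
    have h2 : ((trades_data.map (fun t => (pvTradeKey t, t))).foldl
        (fun d p => d.modify p.1 [] (· ++ [p.2])) PySem.Dict.empty).keys
        = PySem.Set.update PySem.Dict.empty.keys
            ((trades_data.map (fun t => (pvTradeKey t, t))).map Prod.fst) :=
      PySem.Dict.keys_foldl_modify_key _ Prod.fst [] (fun _ p => (· ++ [p.2])) PySem.Dict.empty
    rw [h2]
    simp [PySem.Dict.keys_empty, PySem.Set.update_nil_left, List.map_map, Function.comp_def]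
  rw [PySem.Dict.items_eq_map_keys _ hnd [], hkeys, PySem.List.dedup_eq_ofList]
  apply List.map_congr_left
  intro k _
  rw [PySem.Dict.getD_foldl_modify_append]
  simp [PySem.Dict.getD_empty, List.filter_map, List.map_map, Function.comp_def]
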